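-- pv_equiv track=rewrite | github.com/DWalz/AdventOfCode | 2015/day03.py | get_positions_santa_robot
-- ===== SOURCE A (Python) =====
-- from typing import Callable, Iterable, Tuple
--
-- DIRECTION_POSITION_CHANGES = {
--     '^': (0, 1),
--     '>': (1, 0),
--     'v': (0, -1),
--     '<': (-1, 0)
-- }
--
-- def get_positions_santa_robot(directions: str = '') -> Iterable[Tuple[int, int]]:
--     position_santa = [0, 0]
--     position_robot = [0, 0]
--     yield tuple(position_santa)
--     for i, c in enumerate(directions):
--         change = DIRECTION_POSITION_CHANGES[c]
--         if i & 1: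
--             position_robot[0] += change[0]
--             position_robot[1] += change[1]
--             yield tuple(position_robot)
--         else:
--             position_santa[0] += change[0]
--             position_santa[1] += change[1]
--             yield tuple(position_santa)
-- ===== SOURCE B (Python) =====
-- from typing import Iterable, Tuple
--
-- DIRECTION_POSITION_CHANGES = {
--     '^': (0, 1),
--     '>': (1, 0),
--     'v': (0, -1),
--     '<': (-1, 0)
-- }
--
-- def get_positions_santa_robot(directions: str = '') -> Iterable[Tuple[int, int]]:
--     def walker(moves):
--         x = y = 0
--         for c in moves:
--             dx, dy = DIRECTION_POSITION_CHANGES[c]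
--             x += dx
--             y += dy
--             yield (x, y)
--     santa = walker(directions[0::2])
--     robot = walker(directions[1::2])
--     yield (0, 0)
--     turn, other = santa, robot
--     while True:
--         step = next(turn, None)
--         if step is None:
--             break
--         yield step
--         turn, other = other, turn
-- ===== Notes on version B (the rewrite author's own statement) =====
-- stated objective: alternative
-- what changed: Replaces A's single indexed loop (parity test on enumerate deciding which of two mutable positions to advance) by splitting the direction string pairwise into santa's and robot's shares, running an independent prefix-position generator over each share, and round-robin merging the two streams after the shared starting position.
import Mathlib
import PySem

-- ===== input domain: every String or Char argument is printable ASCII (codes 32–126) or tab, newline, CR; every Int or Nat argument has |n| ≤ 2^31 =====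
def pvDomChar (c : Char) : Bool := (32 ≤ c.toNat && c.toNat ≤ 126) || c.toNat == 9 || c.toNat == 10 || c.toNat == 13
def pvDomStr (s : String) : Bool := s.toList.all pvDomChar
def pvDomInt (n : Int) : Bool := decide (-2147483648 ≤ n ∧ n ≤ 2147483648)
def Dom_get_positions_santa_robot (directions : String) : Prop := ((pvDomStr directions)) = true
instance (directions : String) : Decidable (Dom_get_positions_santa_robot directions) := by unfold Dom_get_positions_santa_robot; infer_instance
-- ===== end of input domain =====

-- B splits the walk into santa's chars and robot's chars (consumed pairwise), runs an
-- independent prefix-position walker over each share, and round-robin merges the two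
-- streams after the shared starting position; objective: alternative decomposition (no speed claim).
-- Both Pythons are generators; equivalence is about the full yielded sequence as a list.


-- ===== PORT A =====
def pvChanges : PySem.Dict Char (Int × Int) :=
  PySem.Dict.ofList [('^', (0, 1)), ('>', (1, 0)), ('v', (0, -1)), ('<', (-1, 0))]

-- A's loop: enumerate(directions); odd index moves the robot, even index moves santa.
-- A KeyError (invalid char) makes the Python generator stop with an exception; those
-- inputs are outside Pre_ and the port simply ends the list there.
def pvLoopA : List Char → Nat → (Int × Int) → (Int × Int) → List (Int × Int)
  | [], _, _, _ => []
  | c :: rest, i, s, r =>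
    match PySem.Dict.get? pvChanges c with
    | none => []
    | some ch =>
      if i % 2 = 1 then
        let r' := (r.1 + ch.1, r.2 + ch.2)
        r' :: pvLoopA rest (i + 1) s r'
      else
        let s' := (s.1 + ch.1, s.2 + ch.2)
        s' :: pvLoopA rest (i + 1) s' r

def get_positions_santa_robot (directions : String) : List (Int × Int) :=
  (0, 0) :: pvLoopA directions.toList 0 (0, 0) (0, 0)

-- ===== PORT B =====
-- B's split loop: consume the chars two at a time, first of each pair to santa,
-- second (if present) to robot.
def pvSplit : List Char → List Char × List Char
  | [] => ([], [])
  | [c] => ([c], [])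
  | c :: c2 :: rest =>
    let p := pvSplit rest
    (c :: p.1, c2 :: p.2)

-- B's walker generator: running position over one share of the moves
-- (KeyError = none ends the stream; outside Pre_).
def pvWalker : List Char → Int → Int → List (Int × Int)
  | [], _, _ => []
  | c :: rest, x, y =>
    match PySem.Dict.get? pvChanges c with
    | none => []
    | some ch => (x + ch.1, y + ch.2) :: pvWalker rest (x + ch.1) (y + ch.2)

-- B's round-robin loop: pull from `turn`, stop on exhaustion, then swap turn/other.
def pvMerge : List (Int × Int) → List (Int × Int) → List (Int × Int)
  | [], _ => []
  | x :: xs, ys => x :: pvMerge ys xs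
  termination_by a b => a.length + b.length
  decreasing_by simp [List.length_cons]; omega

def get_positions_santa_robot_alt (directions : String) : List (Int × Int) :=
  let p := pvSplit directions.toList
  (0, 0) :: pvMerge (pvWalker p.1 0 0) (pvWalker p.2 0 0)

-- ===== PRECONDITION & SPEC =====
-- Pre_ excludes exactly the strings containing a character that is not one of the four direction keys, on which the
-- Python A raises KeyError (returns no full sequence).
def Pre_get_positions_santa_robot (directions : String) : Prop :=
  (directions.toList.all (fun c => ['^', '>', 'v', '<'].contains c)) = true
instance (directions : String) : Decidable (Pre_get_positions_santa_robot directions) := by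
  unfold Pre_get_positions_santa_robot; infer_instance

def pvWitness_get_positions_santa_robot : String := "^>v<^^"

def Spec_get_positions_santa_robot (directions : String) (out : List (Int × Int)) : Prop :=
  out = get_positions_santa_robot_alt directions
instance (directions : String) (out : List (Int × Int)) : Decidable (Spec_get_positions_santa_robot directions out) := by
  unfold Spec_get_positions_santa_robot; infer_instance

-- ===== CLAIM (what is proved, stated in full; the proofs are below) =====
def Claim_equal_get_positions_santa_robot : Prop :=
  ∀ (directions : String), Dom_get_positions_santa_robot directions →
    Pre_get_positions_santa_robot directions →
      Spec_get_positions_santa_robot directions (get_positions_santa_robot directions)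

-- ===== LEMMAS AND PROOFS =====

theorem pvSplit_cons (c : Char) (rest : List Char) :
    pvSplit (c :: rest) = (c :: (pvSplit rest).2, (pvSplit rest).1) := by
  induction rest using pvSplit.induct generalizing c with
  | case1 => simp [pvSplit]
  | case2 c1 => simp [pvSplit]
  | case3 c1 c2 rest2 ih =>
    simp only [pvSplit]
    simp [ih c2]

theorem pvLoopA_eq_merge (cs : List Char) :
    ∀ (i : Nat) (s r : Int × Int), (∀ c ∈ cs, c ∈ ['^', '>', 'v', '<']) →
      pvLoopA cs i s r =
        if i % 2 = 0 then
          pvMerge (pvWalker (pvSplit cs).1 s.1 s.2) (pvWalker (pvSplit cs).2 r.1 r.2)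
        else
          pvMerge (pvWalker (pvSplit cs).1 r.1 r.2) (pvWalker (pvSplit cs).2 s.1 s.2) := by
  induction cs with
  | nil => intro i s r _; simp [pvLoopA, pvSplit, pvWalker, pvMerge]
  | cons c rest ih =>
    intro i s r hvalid
    have hc : c ∈ ['^', '>', 'v', '<'] := hvalid c (List.mem_cons_self ..)
    have hrest : ∀ c' ∈ rest, c' ∈ ['^', '>', 'v', '<'] :=
      fun c' hm => hvalid c' (List.mem_cons_of_mem _ hm)
    obtain ⟨ch, hch⟩ : ∃ ch, PySem.Dict.get? pvChanges c = some ch := by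
      rw [← Option.isSome_iff_exists]
      fin_cases hc <;> decide
    have hchB : PySem.Dict.get? pvChanges c = some ch := hch
    rw [pvSplit_cons]
    by_cases hpar : i % 2 = 0
    · have hpar1 : ¬ (i + 1) % 2 = 0 := by omega
      simp only [pvLoopA, hch, if_neg (by omega : ¬ i % 2 = 1), hpar, if_pos hpar]
      rw [ih (i + 1) (s.1 + ch.1, s.2 + ch.2) r hrest, if_neg hpar1]
      simp [pvWalker, hch, pvMerge]
    · have hpar1 : (i + 1) % 2 = 0 := by omega
      simp only [pvLoopA, hch, if_pos (by omega : i % 2 = 1), if_neg hpar]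
      rw [ih (i + 1) s (r.1 + ch.1, r.2 + ch.2) hrest, if_pos hpar1]
      simp [pvWalker, hch, pvMerge]

-- ===== VERDICT (by name: the statement is the Claim_ definition above) =====
theorem get_positions_santa_robot_spec : Claim_equal_get_positions_santa_robot := by
  intro directions _ hpre
  have h : ∀ c ∈ directions.toList, c ∈ ['^', '>', 'v', '<'] := by
    intro c hc
    have := List.all_eq_true.mp hpre c hc
    simpa using this
  unfold Spec_get_positions_santa_robot get_positions_santa_robot get_positions_santa_robot_alt
  rw [pvLoopA_eq_merge directions.toList 0 (0, 0) (0, 0) h]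
  simp
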